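-- pv_equiv track=rewrite | github.com/vertexproject/synapse | synapse/lib/node.py | _tagscommon
-- ===== SOURCE A (Python) =====
-- def _tagscommon(pode, leafonly):
--     '''
--     Return either all the leaf tags or all the leaf tags and all the internal tags with values
--     '''
--     retn = []
--
--     tags = pode[1].get('tags')
--     if tags is None:
--         return retn
--
--     # brute force rather than build a tree.  faster in small sets.
--     for tag, val in sorted((t for t in pode[1]['tags'].items()), reverse=True, key=lambda x: len(x[0])):
--         look = tag + '.'
--         val = tuple(val)
--         if (leafonly or val == (None, None, None)) and any([r.startswith(look) for r in retn]):
--             continue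
--         retn.append(tag)
--     return retn
-- ===== SOURCE B (Python) =====
-- def _tagscommon(pode, leafonly):
--     '''
--     Return either all the leaf tags or all the leaf tags and all the internal tags with values
--     '''
--     tags = pode[1].get('tags')
--     if tags is None:
--         return []
--
--     retn = []
--     ancestors = set()  # every dotted-prefix ancestor of an accepted tag, tested instead of rescanning retn
--
--     for tag, val in sorted(tags.items(), reverse=True, key=lambda x: len(x[0])):
--         if (leafonly or tuple(val) == (None, None, None)) and tag in ancestors:
--             continue
--         retn.append(tag)
--         for i, ch in enumerate(tag):
--             if ch == '.':
--                 ancestors.add(tag[:i])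
--     return retn
-- ===== Notes on version B (the rewrite author's own statement) =====
-- stated objective: alternative
-- what changed: Instead of rescanning the whole accepted list with any(r.startswith(tag+'.')) for every tag, B maintains one set of all dotted-prefix ancestors of accepted tags and tests each tag by a single set membership.
import Mathlib
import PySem

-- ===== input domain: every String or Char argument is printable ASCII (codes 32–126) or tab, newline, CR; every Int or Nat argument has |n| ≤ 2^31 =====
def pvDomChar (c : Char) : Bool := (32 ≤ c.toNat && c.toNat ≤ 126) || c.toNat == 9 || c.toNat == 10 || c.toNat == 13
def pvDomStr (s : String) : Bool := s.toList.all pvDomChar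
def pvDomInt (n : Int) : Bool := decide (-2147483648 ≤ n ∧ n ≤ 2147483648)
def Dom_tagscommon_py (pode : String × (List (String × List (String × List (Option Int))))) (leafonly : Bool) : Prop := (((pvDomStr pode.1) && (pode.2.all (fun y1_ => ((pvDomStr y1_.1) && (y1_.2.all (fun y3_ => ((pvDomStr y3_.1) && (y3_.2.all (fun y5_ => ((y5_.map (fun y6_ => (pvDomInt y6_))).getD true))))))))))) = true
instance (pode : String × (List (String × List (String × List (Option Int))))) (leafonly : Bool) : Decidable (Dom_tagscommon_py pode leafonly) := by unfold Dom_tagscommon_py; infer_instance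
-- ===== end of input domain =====

-- B replaces A's rescan of the accepted list (any(r.startswith(tag+'.')) over retn at every
-- tag) by one set of all dotted-prefix ancestors of accepted tags, tested by membership.

-- ===== PORT A =====
-- literal port of _tagscommon: sort items by key length descending, scan retn with startswith
def tagscommon_py (pode : String × (List (String × List (String × List (Option Int))))) (leafonly : Bool) : List String :=
  let retn : List String := []
  match PySem.Dict.get? (PySem.Dict.mk pode.2) "tags" with
  | none => retn
  | some tags =>
    (PySem.List.sorted (PySem.Dict.items (PySem.Dict.mk tags)) (fun x => PySem.Str.len x.1) true).foldl
      (fun retn (tv : String × List (Option Int)) =>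
        let look := tv.1 ++ "."
        -- tuple(val) == (None, None, None)  ⟺  the value list is exactly [None, None, None]
        if (leafonly || tv.2 == [none, none, none]) &&
           (retn.map (fun r => PySem.Str.startswith r look)).any (fun b => b)
        then retn
        else retn ++ [tv.1]) retn

-- ===== PORT B =====
-- Source B inner loop: for i, ch in enumerate(tag): if ch == '.': ancestors.add(tag[:i])
def tagsAltAddAnc (s : PySem.Set String) (tag : String) : PySem.Set String :=
  (PySem.List.enumerate tag.toList).foldl
    (fun s ic => if ic.2 == '.' then PySem.Set.add s (PySem.Str.slice tag none (some ic.1)) else s) s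

def tagsAltStep (leafonly : Bool) (st : List String × PySem.Set String)
    (tv : String × List (Option Int)) : List String × PySem.Set String :=
  if (leafonly || tv.2 == [none, none, none]) && PySem.Set.contains st.2 tv.1 then st
  else (st.1 ++ [tv.1], tagsAltAddAnc st.2 tv.1)

def tagscommon_py_alt (pode : String × (List (String × List (String × List (Option Int))))) (leafonly : Bool) : List String :=
  match PySem.Dict.get? (PySem.Dict.mk pode.2) "tags" with
  | none => []
  | some tags =>
    ((PySem.List.sorted (PySem.Dict.items (PySem.Dict.mk tags)) (fun x => PySem.Str.len x.1) true).foldl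
      (tagsAltStep leafonly) ([], PySem.Set.empty)).1

-- ===== PRECONDITION & SPEC =====
def Spec_tagscommon_py (pode : String × (List (String × List (String × List (Option Int))))) (leafonly : Bool) (out : List String) : Prop := out = tagscommon_py_alt pode leafonly
instance (pode : String × (List (String × List (String × List (Option Int))))) (leafonly : Bool) (out : List String) : Decidable (Spec_tagscommon_py pode leafonly out) := by unfold Spec_tagscommon_py; infer_instance

-- ===== CLAIM (what is proved, stated in full; the proofs are below) =====
def Claim_equal_tagscommon_py : Prop := ∀ (pode : String × (List (String × List (String × List (Option Int))))) (leafonly : Bool), Dom_tagscommon_py pode leafonly → Spec_tagscommon_py pode leafonly (tagscommon_py pode leafonly)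

-- ===== LEMMAS AND PROOFS =====

-- (l ++ [c]) is a prefix of L iff L has l at the front and c right after it
theorem pv_prefix_append_singleton {α : Type} (l L : List α) (c : α) :
    (l ++ [c]) <+: L ↔ L.take l.length = l ∧ L[l.length]? = some c := by
  rw [List.prefix_iff_eq_take]
  simp only [List.length_append, List.length_singleton]
  rw [List.take_add_one]
  cases hg : L[l.length]? with
  | none =>
    simp only [Option.toList_none, List.append_nil]
    constructor
    · intro h
      exfalso
      have hlen := congrArg List.length h
      simp only [List.length_append, List.length_singleton, List.length_take] at hlen
      have := List.getElem?_eq_none_iff.mp hg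
      omega
    · rintro ⟨_, h⟩; cases h
  | some a =>
    obtain ⟨hlt, ha⟩ := List.getElem?_eq_some_iff.mp hg
    simp only [Option.toList_some]
    have hlen : l.length = (L.take l.length).length := by
      simp only [List.length_take]; omega
    constructor
    · intro h
      obtain ⟨h3, h4⟩ := List.append_inj h hlen
      refine ⟨h3.symm, ?_⟩
      simp only [List.cons.injEq] at h4
      rw [h4.1]
    · rintro ⟨h1, h2⟩
      simp only [Option.some.injEq] at h2
      rw [h1, h2]


-- startswith r (x ++ ".") holds iff x is a dot-boundary prefix of r
theorem pv_startswith_dot (r x : String) :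
    PySem.Str.startswith r (x ++ ".") = true ↔
      ∃ k, ∃ h : k < r.toList.length, r.toList[k] = '.' ∧ x.toList = r.toList.take k := by
  rw [PySem.Str.startswith_eq, PySem.Chars.startswith_iff]
  have hx : (x ++ ".").toList = x.toList ++ ['.'] := by simp
  rw [hx, pv_prefix_append_singleton]
  constructor
  · rintro ⟨h1, h2⟩
    obtain ⟨hk, hc⟩ := List.getElem?_eq_some_iff.mp h2
    exact ⟨x.toList.length, hk, hc, h1.symm⟩
  · rintro ⟨k, hk, hdot, hx'⟩
    have hlen : x.toList.length = k := by
      rw [hx']; simp only [List.length_take]; omega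
    refine ⟨by rw [hlen, ← hx'], ?_⟩
    rw [hlen, List.getElem?_eq_getElem hk, hdot]

-- membership after the ancestor-adding fold
theorem pv_mem_addAnc (s : PySem.Set String) (tag x : String) :
    x ∈ tagsAltAddAnc s tag ↔
      x ∈ s ∨ PySem.Str.startswith tag (x ++ ".") = true := by
  unfold tagsAltAddAnc
  rw [pv_startswith_dot]
  have main : ∀ (l : List (Int × Char)) (s : PySem.Set String),
      x ∈ l.foldl (fun s ic => if ic.2 == '.' then PySem.Set.add s (PySem.Str.slice tag none (some ic.1)) else s) s ↔
        x ∈ s ∨ ∃ ic ∈ l, ic.2 = '.' ∧ x = PySem.Str.slice tag none (some ic.1) := by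
    intro l
    induction l with
    | nil => intro s; simp
    | cons hd tl ih =>
      intro s
      simp only [List.foldl_cons, List.mem_cons]
      rw [ih]
      by_cases hdot : hd.2 = '.'
      · simp only [hdot, beq_self_eq_true, if_true, PySem.Set.mem_add]
        constructor
        · rintro (⟨hs | he⟩ | ⟨ic, hic, h1, h2⟩)
          · exact Or.inl hs
          · exact Or.inr ⟨hd, Or.inl rfl, hdot, he⟩
          · exact Or.inr ⟨ic, Or.inr hic, h1, h2⟩
        · rintro (hs | ⟨ic, hic | hic, h1, h2⟩)
          · exact Or.inl (Or.inl hs)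
          · subst hic; exact Or.inl (Or.inr h2)
          · exact Or.inr ⟨ic, hic, h1, h2⟩
      · simp only [show (hd.2 == '.') = false from by simpa using hdot, Bool.false_eq_true,
          if_false]
        constructor
        · rintro (hs | ⟨ic, hic, h1, h2⟩)
          · exact Or.inl hs
          · exact Or.inr ⟨ic, Or.inr hic, h1, h2⟩
        · rintro (hs | ⟨ic, hic | hic, h1, h2⟩)
          · exact Or.inl hs
          · exact absurd (hic ▸ h1) hdot
          · exact Or.inr ⟨ic, hic, h1, h2⟩
  rw [main]
  apply or_congr_right
  constructor
  · rintro ⟨ic, hic, h1, h2⟩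
    rw [PySem.List.mem_enumerate_iff] at hic
    obtain ⟨k, hk, hp⟩ := hic
    refine ⟨k, hk, by rw [hp] at h1; simpa using h1, ?_⟩
    rw [hp] at h2
    rw [h2, PySem.Str.toList_slice]
    show PySem.List.slice tag.toList none (some ((0:Int)+k)) = _
    rw [show ((0:Int)+(k:Nat) : Int) = ((k:Nat):Int) by ring,
        PySem.List.slice_to tag.toList (Int.natCast_nonneg k)]
    simp
  · rintro ⟨k, hk, hdot, hx'⟩
    refine ⟨((0:Int) + k, tag.toList[k]), ?_, by simpa using hdot, ?_⟩
    · rw [PySem.List.mem_enumerate_iff]; exact ⟨k, hk, rfl⟩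
    · apply String.toList_inj.mp
      rw [PySem.Str.toList_slice]
      show _ = PySem.List.slice tag.toList none (some ((0:Int)+k))
      rw [show ((0:Int)+(k:Nat) : Int) = ((k:Nat):Int) by ring,
          PySem.List.slice_to tag.toList (Int.natCast_nonneg k)]
      simpa using hx'

-- the invariant relating A's retn scan to B's ancestor set
def pvInv (retn : List String) (s : PySem.Set String) : Prop :=
  ∀ x : String, x ∈ s ↔ ∃ r ∈ retn, PySem.Str.startswith r (x ++ ".") = true

theorem pv_fold_eq (leafonly : Bool) (l : List (String × List (Option Int)))
    (retn : List String) (s : PySem.Set String) (hinv : pvInv retn s) :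
    l.foldl
      (fun retn tv =>
        let look := tv.1 ++ "."
        if (leafonly || tv.2 == [none, none, none]) &&
           (retn.map (fun r => PySem.Str.startswith r look)).any (fun b => b)
        then retn
        else retn ++ [tv.1]) retn
    = (l.foldl (tagsAltStep leafonly) (retn, s)).1 := by
  induction l generalizing retn s with
  | nil => rfl
  | cons tv tl ih =>
    simp only [List.foldl_cons]
    have hcond : ((retn.map (fun r => PySem.Str.startswith r (tv.1 ++ "."))).any (fun b => b))
        = PySem.Set.contains s tv.1 := by
      rw [Bool.eq_iff_iff, PySem.Set.contains_iff, hinv tv.1]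
      simp [List.any_map, List.any_eq_true]
    by_cases hc : ((leafonly || tv.2 == [none, none, none]) && PySem.Set.contains s tv.1) = true
    · have h1 : ((leafonly || tv.2 == [none, none, none]) &&
          (retn.map (fun r => PySem.Str.startswith r (tv.1 ++ "."))).any (fun b => b)) = true := by
        rw [hcond]; exact hc
      simp only [tagsAltStep, hc, if_true, h1, if_true]
      exact ih retn s hinv
    · have h1 : ((leafonly || tv.2 == [none, none, none]) &&
          (retn.map (fun r => PySem.Str.startswith r (tv.1 ++ "."))).any (fun b => b)) = false := by
        rw [hcond]; exact Bool.not_eq_true _ |>.mp hc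
      simp only [tagsAltStep, if_neg hc, h1, Bool.false_eq_true, if_false]
      apply ih
      intro x
      rw [pv_mem_addAnc, hinv x]
      constructor
      · rintro (⟨r, hr, hs⟩ | hs)
        · exact ⟨r, List.mem_append_left _ hr, hs⟩
        · exact ⟨tv.1, List.mem_append_right _ (by simp), hs⟩
      · rintro ⟨r, hr, hs⟩
        rcases List.mem_append.mp hr with hr | hr
        · exact Or.inl ⟨r, hr, hs⟩
        · simp at hr; subst hr; exact Or.inr hs

-- ===== VERDICT (by name: the statement is the Claim_ definition above) =====
theorem tagscommon_py_spec : Claim_equal_tagscommon_py := by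
  intro pode leafonly _
  unfold Spec_tagscommon_py tagscommon_py tagscommon_py_alt
  cases h : PySem.Dict.get? (PySem.Dict.mk pode.2) "tags" with
  | none => rfl
  | some tags =>
    simp only
    exact pv_fold_eq leafonly _ [] PySem.Set.empty (by intro x; simp [PySem.Set.empty])
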